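-- pv_equiv track=rewrite | github.com/HimeshSinghChauhan19/GFG_POTDS | betterString.py | betterString
-- ===== SOURCE A (Python) =====
-- def betterString(str1, str2):
--     # Code here
--     contris={}
--     str1_count,str2_count=1,1
--
--     for i in range(len(str1)):
--         # the new contri of this ith char will be the len of the curr str part
--         new_contri=str1_count*2
--         # the new_contri will be affected if this char had arised before too, so will
--         # subtract it's last contribution in the overall count of subsequences
--         new_contri=new_contri-contris.get(str1[i],0)
--         contris[str1[i]]=str1_count
--         str1_count=new_contri
--
--     contris={}
--     # same for str2
--     for i in range(len(str2)):
--         new_contri=str2_count*2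
--         new_contri=new_contri-contris.get(str2[i],0)
--         contris[str2[i]]=str2_count
--         str2_count=new_contri
--
--     return str1 if str1_count>str2_count else str2 if str2_count>str1_count else str1
-- ===== SOURCE B (Python) =====
-- def betterString(str1, str2):
--     # Count distinct subsequences via a dict of "number of distinct
--     # subsequences ending with each character": for each char c,
--     # ending[c] = 1 + sum(ending.values()); answer = 1 + sum(ending.values()).
--     def count_distinct_subseq(s):
--         ending = {}
--         for c in s:
--             ending[c] = 1 + sum(ending.values())
--         return 1 + sum(ending.values())
--
--     return str1 if count_distinct_subseq(str1) >= count_distinct_subseq(str2) else str2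
-- ===== Notes on version B (the rewrite author's own statement) =====
-- stated objective: alternative
-- what changed: Replaces the running-total-plus-last-contribution-dict DP by the classic dual DP that keeps, per character, the number of distinct subsequences ending with it (ending[c] = 1 + sum(ending.values())), and simplifies the three-way tie-break to a single >= comparison.
import Mathlib
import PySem

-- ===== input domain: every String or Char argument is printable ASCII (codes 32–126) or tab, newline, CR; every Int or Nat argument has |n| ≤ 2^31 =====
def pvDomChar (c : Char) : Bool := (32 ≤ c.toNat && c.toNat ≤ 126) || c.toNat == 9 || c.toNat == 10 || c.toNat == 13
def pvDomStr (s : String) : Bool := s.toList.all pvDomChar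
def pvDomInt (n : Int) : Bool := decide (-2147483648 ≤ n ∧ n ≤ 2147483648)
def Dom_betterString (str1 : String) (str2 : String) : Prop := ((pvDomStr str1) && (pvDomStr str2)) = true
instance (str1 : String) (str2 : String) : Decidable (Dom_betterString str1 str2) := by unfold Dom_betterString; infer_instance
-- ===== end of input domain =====

-- B replaces A's running-count + last-contribution dict by the dual DP keeping, per
-- character, the count of distinct subsequences ending with it (objective: alternative).

-- ===== PORT A =====
-- one loop iteration of A: state (contris, count); new_contri = 2*count - contris.get(c,0);
-- contris[c] = count; count = new_contri
def pvStepA (st : PySem.Dict Char Int × Int) (c : Char) : PySem.Dict Char Int × Int :=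
  (st.1.insert c st.2, st.2 * 2 - st.1.getD c 0)

def betterString (str1 : String) (str2 : String) : String :=
  let st1 := str1.toList.foldl pvStepA (PySem.Dict.empty, 1)
  let st2 := str2.toList.foldl pvStepA (PySem.Dict.empty, 1)
  if st1.2 > st2.2 then str1 else if st2.2 > st1.2 then str2 else str1

-- ===== PORT B =====
-- sum(ending.values())
def pvSumv (d : PySem.Dict Char Int) : Int := d.values.sum

-- 1 + sum over the dict built by ending[c] = 1 + sum(ending.values()) for each char
def pvCountAlt (s : String) : Int :=
  1 + pvSumv (s.toList.foldl (fun d c => d.insert c (1 + pvSumv d)) PySem.Dict.empty)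

def betterString_alt (str1 : String) (str2 : String) : String :=
  if pvCountAlt str1 ≥ pvCountAlt str2 then str1 else str2

-- ===== PRECONDITION & SPEC =====
def Spec_betterString (str1 : String) (str2 : String) (out : String) : Prop := out = betterString_alt str1 str2
instance (str1 : String) (str2 : String) (out : String) : Decidable (Spec_betterString str1 str2 out) := by unfold Spec_betterString; infer_instance

-- ===== CLAIM (what is proved, stated in full; the proofs are below) =====
def Claim_equal_betterString : Prop := ∀ (str1 : String) (str2 : String), Dom_betterString str1 str2 → Spec_betterString str1 str2 (betterString str1 str2)

-- ===== LEMMAS AND PROOFS =====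

-- replacing the unique pair keyed k (with value w) by (k, v) changes the value sum by v - w
lemma pvSum_replace (l : List (Char × Int)) (k : Char) (v w : Int)
    (hnd : (l.map Prod.fst).Nodup) (hmem : (k, w) ∈ l) :
    ((l.map (fun p => if p.1 == k then (k, v) else p)).map Prod.snd).sum
      = (l.map Prod.snd).sum - w + v := by
  induction l with
  | nil => cases hmem
  | cons a t ih =>
    simp only [List.map_cons, List.nodup_cons] at hnd
    rcases List.mem_cons.mp hmem with h | h
    · have ha : a = (k, w) := h.symm
      subst ha
      have ht : t.map (fun p => if p.1 == k then (k, v) else p) = t := by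
        have hid : t.map (fun p => if p.1 == k then (k, v) else p) = t.map id := by
          apply List.map_congr_left
          intro p hp
          have hpk : p.1 ≠ k := by
            intro hk
            apply hnd.1
            show k ∈ t.map Prod.fst
            rw [← hk]
            exact List.mem_map_of_mem (f := Prod.fst) hp
          simp [hpk]
        rw [hid, List.map_id]
      simp only [List.map_cons, ht, beq_self_eq_true, if_pos, List.sum_cons]
      ring
    · have hak : (a.1 == k) = false := by
        apply beq_eq_false_iff_ne.mpr
        intro hk
        apply hnd.1
        rw [hk]
        exact List.mem_map_of_mem (f := Prod.fst) h
      simp only [List.map_cons, hak, Bool.false_eq_true, if_neg, List.sum_cons,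
        not_false_eq_true]
      rw [ih hnd.2 h]
      ring

-- sum of values after an insert: subtract the old value at k (0 if absent) and add v
lemma pvSumv_insert (d : PySem.Dict Char Int) (k : Char) (v : Int)
    (hnd : d.keys.Nodup) :
    pvSumv (d.insert k v) = pvSumv d - d.getD k 0 + v := by
  have hnd' : (d.items.map Prod.fst).Nodup := by
    simpa [PySem.Dict.keys] using hnd
  cases hco : d.contains k with
  | true =>
    have hs : (d.get? k).isSome = true := by
      rw [← PySem.Dict.contains_eq_isSome_get?]; exact hco
    obtain ⟨w, hw⟩ := Option.isSome_iff_exists.mp hs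
    have hmem : (k, w) ∈ d.items := PySem.Dict.mem_items_of_get?_eq_some d hw
    have hgd : d.getD k 0 = w := PySem.Dict.getD_of_get?_eq_some d 0 hw
    simp only [pvSumv, PySem.Dict.values, PySem.Dict.items_insert_of_contains d v hco, hgd]
    exact pvSum_replace d.items k v w hnd' hmem
  | false =>
    have hgd : d.getD k 0 = 0 := PySem.Dict.getD_of_not_contains d 0 hco
    simp [pvSumv, PySem.Dict.values, PySem.Dict.items_insert_of_not_contains d v hco, hgd]

-- invariant: A's fold from (d, 1 + sum values d) tracks B's fold, count = 1 + sum of B's dict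
lemma pvLoop_eq (l : List Char) (d : PySem.Dict Char Int) (hnd : d.keys.Nodup) :
    l.foldl pvStepA (d, 1 + pvSumv d)
      = (l.foldl (fun d c => d.insert c (1 + pvSumv d)) d,
         1 + pvSumv (l.foldl (fun d c => d.insert c (1 + pvSumv d)) d)) := by
  induction l generalizing d with
  | nil => rfl
  | cons c t ih =>
    simp only [List.foldl_cons]
    have hstep : pvStepA (d, 1 + pvSumv d) c
        = (d.insert c (1 + pvSumv d), 1 + pvSumv (d.insert c (1 + pvSumv d))) := by
      unfold pvStepA
      simp only [Prod.mk.injEq, true_and]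
      rw [pvSumv_insert d c _ hnd]
      ring
    rw [hstep]
    exact ih _ (PySem.Dict.nodup_keys_insert d c _ hnd)

-- the two counting loops agree
lemma pvCount_eq (s : String) :
    (s.toList.foldl pvStepA (PySem.Dict.empty, 1)).2 = pvCountAlt s := by
  have h0 : pvSumv (PySem.Dict.empty : PySem.Dict Char Int) = 0 := by
    simp [pvSumv, PySem.Dict.values, PySem.Dict.empty]
  have h1 : ((PySem.Dict.empty, (1 : Int)) : PySem.Dict Char Int × Int)
      = (PySem.Dict.empty, 1 + pvSumv (PySem.Dict.empty : PySem.Dict Char Int)) := by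
    rw [h0]; norm_num
  rw [pvCountAlt, h1, pvLoop_eq s.toList PySem.Dict.empty PySem.Dict.nodup_keys_empty]

-- ===== VERDICT (by name: the statement is the Claim_ definition above) =====
theorem betterString_spec : Claim_equal_betterString := by
  intro str1 str2 _
  unfold Spec_betterString betterString betterString_alt
  rw [← pvCount_eq str1, ← pvCount_eq str2]
  rcases lt_trichotomy (str1.toList.foldl pvStepA (PySem.Dict.empty, 1)).2
      (str2.toList.foldl pvStepA (PySem.Dict.empty, 1)).2 with h | h | h
  · rw [if_neg (by omega), if_pos (by omega), if_neg (by omega)]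
  · rw [if_neg (by omega), if_neg (by omega), if_pos (by omega)]
  · rw [if_pos (by omega), if_pos (by omega)]
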